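-- pv_equiv track=rewrite | github.com/ourhouchmohamed97/CTF-Playground | test_rolling_xor.py | rolling_xor_correct
-- ===== SOURCE A (Python) =====
-- def rolling_xor_correct(data):
--     """Corrected rolling XOR - handles sign extension"""
--     key = 0x42
--     result = 0
--
--     for byte_val in data:
--         result = result << 8  # Shift result left 8 bits
--
--         # ROL key by 1
--         key = ((key << 1) | (key >> 7)) & 0xFF
--
--         # XOR byte with key
--         xored = byte_val ^ key
--
--         # Sign extend if high bit is set
--         if xored & 0x80:
--             xored_ext = xored | 0xFFFFFFFFFFFFFF00
--         else:
--             xored_ext = xored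
--
--         # XOR with result
--         result = result ^ xored_ext
--
--     # Mask to 64 bits
--     result = result & 0xFFFFFFFFFFFFFFFF
--     return result
-- ===== SOURCE B (Python) =====
-- # Faster exact re-implementation: the accumulator is shifted left 8 bits per
-- # byte and masked to 64 bits at the end, so only the last 8 bytes can affect
-- # the result; and the rotating key at index j is just ROL(0x42, (j+1) % 8),
-- # a fixed 8-entry table.  Process only the final min(n, 8) bytes: O(1) work.
-- _KEYS = [0x42, 0x84, 0x09, 0x12, 0x24, 0x48, 0x90, 0x21]
--
-- def rolling_xor_correct(data):
--     n = len(data)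
--     start = max(0, n - 8)
--     result = 0
--     for j in range(start, n):
--         x = data[j] ^ _KEYS[(j + 1) % 8]
--         if x & 0x80:
--             x |= 0xFFFFFFFFFFFFFF00  # sign extend into the 64-bit window
--         result = (result << 8) ^ x
--     return result & 0xFFFFFFFFFFFFFFFF
-- ===== Notes on version B (the rewrite author's own statement) =====
-- stated objective: faster
-- what changed: B drops the per-byte key-rotation state and the full-list scan: since the 64-bit masked accumulator is shifted 8 bits per byte, only the last 8 bytes can affect the result, and the rotating key at index j is the fixed table ROL(0x42,(j+1)%8); B processes only the final min(n,8) bytes.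
import Mathlib
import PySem

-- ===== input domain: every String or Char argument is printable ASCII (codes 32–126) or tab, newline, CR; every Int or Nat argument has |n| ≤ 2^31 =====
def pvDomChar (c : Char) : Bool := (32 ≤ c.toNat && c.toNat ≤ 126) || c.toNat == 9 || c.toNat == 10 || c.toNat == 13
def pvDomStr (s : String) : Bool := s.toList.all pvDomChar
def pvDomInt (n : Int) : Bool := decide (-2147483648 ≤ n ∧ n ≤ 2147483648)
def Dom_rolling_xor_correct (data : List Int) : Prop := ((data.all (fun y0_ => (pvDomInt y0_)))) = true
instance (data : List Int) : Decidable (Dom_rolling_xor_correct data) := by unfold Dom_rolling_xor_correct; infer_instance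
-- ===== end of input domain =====

-- B is faster: only the last min(n,8) bytes can reach the 64-bit masked
-- accumulator, and the rotating key at index j is a fixed 8-entry table,
-- so B processes just the final ≤ 8 bytes instead of the whole list.

-- ===== PORT A =====
def rxcStep (st : Int × Int) (byte_val : Int) : Int × Int :=
  let result := st.2 <<< (8 : Nat)
  let key := PySem.Int.band (PySem.Int.bor (st.1 <<< (1 : Nat)) (st.1 >>> (7 : Nat))) 0xFF
  let xored := PySem.Int.bxor byte_val key
  let xored_ext := if PySem.Int.band xored 0x80 ≠ 0
                   then PySem.Int.bor xored 0xFFFFFFFFFFFFFF00 else xored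
  (key, PySem.Int.bxor result xored_ext)

def rolling_xor_correct (data : List Int) : Int :=
  PySem.Int.band (data.foldl rxcStep (0x42, 0)).2 0xFFFFFFFFFFFFFFFF

-- ===== PORT B =====
def rxcKeys : List Int := [0x42, 0x84, 0x09, 0x12, 0x24, 0x48, 0x90, 0x21]

def rxcAltLoop : List Int → Nat → Int → Int
  | [], _, result => result
  | b :: t, j, result =>
    let x := PySem.Int.bxor b (rxcKeys.getD ((j + 1) % 8) 0)
    let x' := if PySem.Int.band x 0x80 ≠ 0
              then PySem.Int.bor x 0xFFFFFFFFFFFFFF00 else x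
    rxcAltLoop t (j + 1) (PySem.Int.bxor (result <<< (8 : Nat)) x')

def rolling_xor_correct_alt (data : List Int) : Int :=
  let n := data.length
  let start := n - 8
  PySem.Int.band (rxcAltLoop (data.drop start) start 0) 0xFFFFFFFFFFFFFFFF

-- ===== PRECONDITION & SPEC =====
def Spec_rolling_xor_correct (data : List Int) (out : Int) : Prop := out = rolling_xor_correct_alt data
instance (data : List Int) (out : Int) : Decidable (Spec_rolling_xor_correct data out) := by unfold Spec_rolling_xor_correct; infer_instance

-- ===== CLAIM (what is proved, stated in full; the proofs are below) =====
def Claim_equal_rolling_xor_correct : Prop := ∀ (data : List Int), Dom_rolling_xor_correct data → Spec_rolling_xor_correct data (rolling_xor_correct data)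

-- ===== LEMMAS AND PROOFS =====

-- subtraction of a bitwise submask is xor
theorem nat_sub_eq_xor_of_subset : ∀ (x y : Nat), y &&& x = y → x - y = x ^^^ y := by
  intro x
  induction x using Nat.binaryRec with
  | zero => intro y h; simp_all
  | bit b n ih =>
    intro y h
    rw [← Nat.bit_bodd_div2 y] at h ⊢
    rw [Nat.land_bit] at h
    rw [Nat.xor_bit]
    have hb : (y.bodd && b) = y.bodd := by
      have := congrArg Nat.bodd h
      simpa [Nat.bodd_bit] using this
    have hn : y.div2 &&& n = y.div2 := by
      have := congrArg Nat.div2 h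
      simpa [Nat.div2_bit] using this
    have ihn := ih _ hn
    have hle : y.div2 ≤ n := hn ▸ Nat.and_le_right
    have h1 : y.bodd.toNat ≤ b.toNat := by cases b <;> cases hyb : y.bodd <;> simp_all
    have h2 : (b != y.bodd).toNat = b.toNat - y.bodd.toNat := by
      cases b <;> cases hyb : y.bodd <;> simp_all
    rw [Nat.bit_val, Nat.bit_val, Nat.bit_val, h2]
    omega

theorem nat_xor_mod (x y : Nat) : (x ^^^ y) % 2 ^ 64 = (x % 2 ^ 64) ^^^ (y % 2 ^ 64) := by
  apply Nat.eq_of_testBit_eq; intro i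
  simp only [Nat.testBit_mod_two_pow, Nat.testBit_xor]
  by_cases h : i < 64 <;> simp [h]

theorem nat_and_mask (x : Nat) : x &&& (2 ^ 64 - 1) = x % 2 ^ 64 := by
  apply Nat.eq_of_testBit_eq; intro i
  simp only [Nat.testBit_mod_two_pow, Nat.testBit_land, Nat.testBit_two_pow_sub_one]
  by_cases h : i < 64 <;> simp [h]

theorem nat_shift_xor (x y k : Nat) :
    ((x ^^^ y) <<< k) % 2 ^ 64 = ((x <<< k) % 2 ^ 64) ^^^ ((y <<< k) % 2 ^ 64) := by
  apply Nat.eq_of_testBit_eq; intro i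
  simp only [Nat.testBit_mod_two_pow, Nat.testBit_xor, Nat.testBit_shiftLeft]
  by_cases h : i < 64 <;> by_cases h2 : i ≥ k <;> simp [h, h2]

theorem nat_shift_mod (x k : Nat) : ((x % 2 ^ 64) <<< k) % 2 ^ 64 = (x <<< k) % 2 ^ 64 := by
  apply Nat.eq_of_testBit_eq; intro i
  simp only [Nat.testBit_mod_two_pow, Nat.testBit_shiftLeft]
  by_cases h : i < 64 <;> by_cases h2 : i ≥ k <;>
    simp [h, h2] <;> omega

def emN (a : Int) : Nat := (a % (18446744073709551616 : Int)).toNat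

theorem pow64 : (2:Nat) ^ 64 = 18446744073709551616 := by norm_num

theorem emN_lt (a : Int) : emN a < 2 ^ 64 := by
  unfold emN; rw [pow64]
  have h1 := Int.emod_nonneg a (by norm_num : (18446744073709551616:Int) ≠ 0)
  have h2 := Int.emod_lt_of_pos a (by norm_num : (0:Int) < 18446744073709551616)
  omega

theorem emN_nonneg (a : Int) (h : 0 ≤ a) : emN a = a.toNat % 2 ^ 64 := by
  unfold emN; rw [pow64]; omega

theorem emN_neg (a : Int) (h : a < 0) :
    emN a = (2 ^ 64 - 1) ^^^ ((-a - 1).toNat % 2 ^ 64) := by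
  have hsub : emN a = (2 ^ 64 - 1) - ((-a - 1).toNat % 2 ^ 64) := by
    unfold emN; rw [pow64]; omega
  have hsubset : ((-a - 1).toNat % 2 ^ 64) &&& (2 ^ 64 - 1) = (-a - 1).toNat % 2 ^ 64 := by
    rw [nat_and_mask, Nat.mod_mod_of_dvd _ dvd_rfl]
  rw [hsub, nat_sub_eq_xor_of_subset _ _ hsubset]

theorem emN_natCast (m : Nat) : emN (m : Int) = m % 2 ^ 64 := by
  rw [emN_nonneg _ (by positivity), Int.toNat_natCast]

theorem xor_left_comm' (a b c : Nat) : a ^^^ (b ^^^ c) = b ^^^ (a ^^^ c) := by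
  rw [← Nat.xor_assoc, Nat.xor_comm a b, Nat.xor_assoc]

theorem xor_xor_cancel (m a b : Nat) : (m ^^^ a) ^^^ (m ^^^ b) = a ^^^ b := by
  rw [Nat.xor_assoc, xor_left_comm' a m b, Nat.xor_cancel_left]

theorem emN_bxor (a b : Int) : emN (PySem.Int.bxor a b) = emN a ^^^ emN b := by
  unfold PySem.Int.bxor
  by_cases ha : 0 ≤ a <;> by_cases hb : 0 ≤ b <;> simp only [ha, hb, ite_true, ite_false]
  · rw [emN_natCast, emN_nonneg a ha, emN_nonneg b hb, nat_xor_mod]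
  · have hneg : -(↑(a.toNat ^^^ (-b - 1).toNat) : Int) - 1 < 0 := by omega
    rw [emN_neg _ hneg, emN_nonneg a ha, emN_neg b (by omega)]
    have hsimp : (-(-(↑(a.toNat ^^^ (-b - 1).toNat) : Int) - 1) - 1).toNat
        = a.toNat ^^^ (-b - 1).toNat := by omega
    rw [hsimp, nat_xor_mod, xor_left_comm']
  · have hneg : -(↑((-a - 1).toNat ^^^ b.toNat) : Int) - 1 < 0 := by omega
    rw [emN_neg _ hneg, emN_neg a (by omega), emN_nonneg b hb]
    have hsimp : (-(-(↑((-a - 1).toNat ^^^ b.toNat) : Int) - 1) - 1).toNat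
        = (-a - 1).toNat ^^^ b.toNat := by omega
    rw [hsimp, nat_xor_mod, Nat.xor_assoc]
  · rw [emN_natCast, emN_neg a (by omega), emN_neg b (by omega), nat_xor_mod, xor_xor_cancel]

theorem emN_shift8 (a : Int) : emN (a <<< (8 : Nat)) = (emN a <<< 8) % 2 ^ 64 := by
  rw [Int.shiftLeft_eq, Nat.shiftLeft_eq]
  unfold emN
  rw [pow64]
  norm_num
  omega

theorem band_mask_eq_emN (r : Int) :
    PySem.Int.band r 0xFFFFFFFFFFFFFFFF = (emN r : Int) := by
  unfold PySem.Int.band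
  by_cases hr : 0 ≤ r <;>
    simp only [hr, (by norm_num : (0:Int) ≤ (0xFFFFFFFFFFFFFFFF:Int)), ite_true, ite_false]
  · rw [(by decide : (0xFFFFFFFFFFFFFFFF:Int).toNat = 2 ^ 64 - 1), nat_and_mask,
      emN_nonneg r hr]
  · rw [(by decide : (0xFFFFFFFFFFFFFFFF:Int).toNat = 2 ^ 64 - 1)]
    rw [Nat.land_comm, nat_and_mask]
    rw [emN_neg r (by omega)]
    congr 1
    rw [nat_sub_eq_xor_of_subset _ _ (by rw [nat_and_mask, Nat.mod_mod_of_dvd _ dvd_rfl])]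

def extOf (b k : Int) : Int :=
  let x := PySem.Int.bxor b k
  if PySem.Int.band x 0x80 ≠ 0 then PySem.Int.bor x 0xFFFFFFFFFFFFFF00 else x

def natLoop : List Int → Nat → Nat → Nat
  | [], _, acc => acc
  | b :: t, j, acc =>
      natLoop t (j + 1) (((acc <<< 8) % 2 ^ 64) ^^^ emN (extOf b (rxcKeys.getD ((j + 1) % 8) 0)))

theorem emN_step (r x' : Int) :
    emN (PySem.Int.bxor (r <<< (8 : Nat)) x') = ((emN r <<< 8) % 2 ^ 64) ^^^ emN x' := by
  rw [emN_bxor, emN_shift8]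

theorem altLoop_to_nat : ∀ (l : List Int) (j : Nat) (r : Int),
    emN (rxcAltLoop l j r) = natLoop l j (emN r) := by
  intro l
  induction l with
  | nil => intro j r; rfl
  | cons b t ih =>
    intro j r
    show emN (rxcAltLoop t (j + 1) _) = natLoop t (j + 1) _
    rw [ih, emN_step]
    rfl

theorem keyRot (v : Nat) (hv : v < 8) :
    PySem.Int.band (PySem.Int.bor ((rxcKeys.getD v 0) <<< (1 : Nat)) ((rxcKeys.getD v 0) >>> (7 : Nat))) 0xFF
      = rxcKeys.getD ((v + 1) % 8) 0 := by
  interval_cases v <;> decide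

theorem foldl_to_nat : ∀ (l : List Int) (j : Nat) (r : Int),
    emN ((List.foldl rxcStep (rxcKeys.getD (j % 8) 0, r) l).2) = natLoop l j (emN r) := by
  intro l
  induction l with
  | nil => intro j r; rfl
  | cons b t ih =>
    intro j r
    have hk : PySem.Int.band (PySem.Int.bor ((rxcKeys.getD (j % 8) 0) <<< (1 : Nat))
        ((rxcKeys.getD (j % 8) 0) >>> (7 : Nat))) 0xFF = rxcKeys.getD ((j + 1) % 8) 0 := by
      rw [keyRot (j % 8) (Nat.mod_lt _ (by norm_num))]
      congr 1
      omega
    have hstep : rxcStep (rxcKeys.getD (j % 8) 0, r) b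
        = (rxcKeys.getD ((j + 1) % 8) 0,
           PySem.Int.bxor (r <<< (8 : Nat)) (extOf b (rxcKeys.getD ((j + 1) % 8) 0))) := by
      simp only [rxcStep, extOf, hk]
    show emN ((List.foldl rxcStep (rxcStep (rxcKeys.getD (j % 8) 0, r) b) t).2) = _
    rw [hstep, ih (j + 1), emN_step]
    rfl

theorem natLoop_lt : ∀ (l : List Int) (j a : Nat), a < 2 ^ 64 → natLoop l j a < 2 ^ 64 := by
  intro l
  induction l with
  | nil => intro j a h; exact h
  | cons b t ih =>
    intro j a _
    exact ih _ _ (Nat.xor_lt_two_pow (Nat.mod_lt _ (by positivity)) (emN_lt _))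

theorem natLoop_append (l₁ l₂ : List Int) : ∀ (j a : Nat),
    natLoop (l₁ ++ l₂) j a = natLoop l₂ (j + l₁.length) (natLoop l₁ j a) := by
  induction l₁ with
  | nil => intro j a; simp [natLoop]
  | cons b t ih =>
    intro j a
    show natLoop (t ++ l₂) (j + 1) _ = _
    rw [ih]
    have : j + 1 + t.length = j + (b :: t).length := by simp; omega
    rw [this]
    rfl

theorem natLoop_affine : ∀ (l : List Int) (j a : Nat), a < 2 ^ 64 →
    natLoop l j a = ((a <<< (8 * l.length)) % 2 ^ 64) ^^^ natLoop l j 0 := by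
  intro l
  induction l with
  | nil =>
    intro j a ha
    simp [natLoop, Nat.shiftLeft_zero]
    omega
  | cons b t ih =>
    intro j a ha
    have he : emN (extOf b (rxcKeys.getD ((j + 1) % 8) 0)) < 2 ^ 64 := emN_lt _
    show natLoop t (j + 1) (((a <<< 8) % 2 ^ 64) ^^^ _) = _
    rw [ih _ _ (Nat.xor_lt_two_pow (Nat.mod_lt _ (by positivity)) he)]
    have h0 : natLoop (b :: t) j 0
        = natLoop t (j + 1) (emN (extOf b (rxcKeys.getD ((j + 1) % 8) 0))) := by
      show natLoop t (j + 1) (((0 <<< 8) % 2 ^ 64) ^^^ _) = _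
      norm_num
    rw [h0, ih _ _ he]
    rw [nat_shift_xor, nat_shift_mod, ← Nat.shiftLeft_add]
    have hlen : 8 + 8 * t.length = 8 * (b :: t).length := by simp; omega
    rw [hlen, Nat.xor_assoc]

theorem nat_shift64_mod (x : Nat) : (x <<< 64) % 2 ^ 64 = 0 := by
  rw [Nat.shiftLeft_eq, Nat.mul_mod_left]

theorem main_eq (data : List Int) : rolling_xor_correct data = rolling_xor_correct_alt data := by
  unfold rolling_xor_correct rolling_xor_correct_alt
  rw [band_mask_eq_emN, band_mask_eq_emN]
  congr 1
  have h0 : ((0x42 : Int), (0 : Int)) = (rxcKeys.getD (0 % 8) 0, (0 : Int)) := rfl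
  rw [h0, foldl_to_nat data 0 0, altLoop_to_nat]
  have e0 : emN (0 : Int) = 0 := rfl
  rw [e0]
  conv_lhs => rw [← List.take_append_drop (data.length - 8) data]
  rw [natLoop_append]
  have hlt : (data.take (data.length - 8)).length = data.length - 8 := by
    simp [List.length_take]
  rw [hlt, Nat.zero_add]
  rcases Nat.lt_or_ge data.length 8 with h | h
  · have hs : data.length - 8 = 0 := by omega
    simp [hs, natLoop]
  · rw [natLoop_affine _ _ _ (natLoop_lt _ _ _ (by positivity))]
    have hdl : (data.drop (data.length - 8)).length = 8 := by
      simp [List.length_drop]; omega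
    rw [hdl, show 8 * 8 = 64 from rfl, nat_shift64_mod, Nat.zero_xor]

-- ===== VERDICT (by name: the statement is the Claim_ definition above) =====
theorem rolling_xor_correct_spec : Claim_equal_rolling_xor_correct := by
  intro data _
  unfold Spec_rolling_xor_correct
  exact main_eq data
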